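-- pv_equiv track=rewrite | github.com/Michael14567/Signal | mian.py | build_trellis_by_codewords
-- ===== SOURCE A (Python) =====
-- def build_trellis_by_codewords(codewords):
--     n = len(codewords[0])
--
--     state_names = []
--     prefix_to_state = []
--
--     for level in range(n + 1):
--         groups = {}
--         prefix_map = {}
--
--         prefixes = sorted(set(word[:level] for word in codewords))
--
--         for prefix in prefixes:
--             futures = tuple(
--                 sorted(
--                     word[level:]
--                     for word in codewords
--                     if word[:level] == prefix
--                 )
--             )
--
--             if futures not in groups:
--                 groups[futures] = f"S{level}_{len(groups)}"
--
--             prefix_map[prefix] = groups[futures]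
--
--         state_names.append(sorted(groups.values()))
--         prefix_to_state.append(prefix_map)
--
--     edges = []
--
--     for level in range(n):
--         edge_set = set()
--
--         for word in codewords:
--             source_prefix = word[:level]
--             target_prefix = word[:level + 1]
--
--             source = prefix_to_state[level][source_prefix]
--             target = prefix_to_state[level + 1][target_prefix]
--             label = word[level]
--
--             edge_set.add((source, target, label))
--
--         edges.append(sorted(edge_set))
--
--     return state_names, edges
-- ===== SOURCE B (Python) =====
-- def build_trellis_by_codewords(codewords):
--     n = len(codewords[0])
--     words = sorted(codewords)
--     m = len(words)
--
--     state_names = []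
--     prefix_to_state = []
--
--     for level in range(n + 1):
--         # words are sorted, so equal prefixes are contiguous and the suffixes of a
--         # run are already in sorted order: one contiguous sweep, no per-prefix rescan
--         groups = {}
--         prefix_map = {}
--         i = 0
--         while i < m:
--             prefix = words[i][:level]
--             futures = []
--             while i < m and words[i][:level] == prefix:
--                 futures.append(words[i][level:])
--                 i += 1
--             key = tuple(futures)
--             state = groups.get(key)
--             if state is None:
--                 state = f"S{level}_{len(groups)}"
--                 groups[key] = state
--             prefix_map[prefix] = state
--         state_names.append(sorted(groups.values()))
--         prefix_to_state.append(prefix_map)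
--
--     edges = []
--     for level in range(n):
--         source_map = prefix_to_state[level]
--         target_map = prefix_to_state[level + 1]
--         edges.append(sorted({(source_map[p[:-1]], target_map[p], p[-1])
--                              for p in target_map}))
--
--     return state_names, edges
-- ===== Notes on version B (the rewrite author's own statement) =====
-- stated objective: faster
-- what changed: B sorts the codewords once and builds each level's states in one contiguous sweep over the sorted list (equal prefixes are adjacent and their suffixes come out already sorted), instead of A's re-scan of all words and re-sort of suffixes for every prefix; edges are derived from the (level+1) prefix map's keys instead of re-scanning all words per level.
import Mathlib
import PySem

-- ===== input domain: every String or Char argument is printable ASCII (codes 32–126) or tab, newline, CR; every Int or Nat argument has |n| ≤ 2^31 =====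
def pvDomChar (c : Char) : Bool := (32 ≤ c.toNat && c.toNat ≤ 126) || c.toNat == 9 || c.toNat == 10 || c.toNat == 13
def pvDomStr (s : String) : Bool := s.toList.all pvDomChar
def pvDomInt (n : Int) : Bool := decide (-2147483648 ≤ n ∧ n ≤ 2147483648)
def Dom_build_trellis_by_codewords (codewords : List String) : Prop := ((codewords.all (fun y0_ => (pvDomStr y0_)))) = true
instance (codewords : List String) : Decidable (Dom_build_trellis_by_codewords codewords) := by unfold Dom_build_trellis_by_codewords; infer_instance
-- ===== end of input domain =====

-- ===== PORT A =====
-- Header: B sorts the codewords once and then builds each level's states in one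
-- contiguous sweep over the sorted list (equal prefixes are adjacent and their suffixes
-- already sorted), and derives edges from the (level+1) prefix map instead of rescanning
-- all words per prefix (objective: faster).
-- Helper shared by both ports: Python's f"S{level}_{len(groups)}".
def pvStateName (level : Int) (k : Int) : String :=
  PySem.Str.join "" ["S", PySem.Int.toStr level, "_", PySem.Int.toStr k]

-- Helper shared by both ports: Python's sorted(...) on 3-tuples of strings compares the
-- tuples lexicographically; the key [t1, t2, t3] under the lexicographic order on
-- List String is exact for same-length tuples.
def pvEdgeKey (t : String × String × String) : List String := [t.1, t.2.1, t.2.2]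

def pvSortEdges (xs : List (String × String × String)) : List (String × String × String) :=
  @PySem.List.sorted _ _ LinearOrder.toPartialOrder.toLT LinearOrder.toDecidableLT xs pvEdgeKey false

-- A: prefixes = sorted(set(word[:level] for word in codewords))
def pvA_prefixes (codewords : List String) (level : Int) : List String :=
  PySem.List.sorted (PySem.Set.ofList (codewords.map (fun word => PySem.Str.slice word none (some level)))) (fun s => s) false

-- A: body of "for prefix in prefixes" (futures recomputed by scanning all words)
def pvA_groupStep (level : Int) (codewords : List String)
    (st : PySem.Dict (List String) String × PySem.Dict String String) (pfx : String) :
    PySem.Dict (List String) String × PySem.Dict String String :=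
  let futures := PySem.List.sorted
      ((codewords.filter (fun word => PySem.Str.slice word none (some level) == pfx)).map
        (fun word => PySem.Str.slice word (some level) none)) (fun s => s) false
  let groups := if st.1.contains futures then st.1 else st.1.insert futures (pvStateName level st.1.size)
  (groups, st.2.insert pfx (groups.getD futures ""))

def pvA_levelFold (codewords : List String) (level : Int) :
    PySem.Dict (List String) String × PySem.Dict String String :=
  (pvA_prefixes codewords level).foldl (pvA_groupStep level codewords) (PySem.Dict.empty, PySem.Dict.empty)

def pvA_stateStep (codewords : List String)
    (acc : List (List String) × List (PySem.Dict String String)) (level : Int) :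
    List (List String) × List (PySem.Dict String String) :=
  let gp := pvA_levelFold codewords level
  (acc.1 ++ [PySem.List.sorted gp.1.values (fun s => s) false], acc.2 ++ [gp.2])

-- A: one edge tuple (source, target, label) for a word (dict lookups always hit under Pre_)
def pvA_edge (maps : List (PySem.Dict String String)) (level : Int) (word : String) :
    String × String × String :=
  ((PySem.List.pyGetD maps level PySem.Dict.empty).getD (PySem.Str.slice word none (some level)) "",
   (PySem.List.pyGetD maps (level + 1) PySem.Dict.empty).getD (PySem.Str.slice word none (some (level + 1))) "",
   ((PySem.Str.pyGet? word level).map (fun c => String.ofList [c])).getD "")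

def pvA_edgeStep (codewords : List String) (maps : List (PySem.Dict String String))
    (acc : List (List (String × String × String))) (level : Int) :
    List (List (String × String × String)) :=
  let es := codewords.foldl (fun s word => PySem.Set.add s (pvA_edge maps level word)) PySem.Set.empty
  acc ++ [pvSortEdges es]

def build_trellis_by_codewords (codewords : List String) :
    List (List String) × (List (List (String × String × String))) :=
  let n : Int := PySem.Str.len ((PySem.List.pyGet? codewords 0).getD "")
  let sp := (PySem.List.pyRange 0 (n + 1)).foldl (pvA_stateStep codewords) ([], [])
  let edges := (PySem.List.pyRange 0 n).foldl (pvA_edgeStep codewords sp.2) []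
  (sp.1, edges)

-- ===== PORT B =====
-- B: words[i][:level] and words[i][level:]
def pvKeyPfx (level : Int) (w : String) : String := PySem.Str.slice w none (some level)
def pvSufFut (level : Int) (w : String) : String := PySem.Str.slice w (some level) none

-- B: the two nested while loops over the sorted word list: peel off the contiguous run
-- of words sharing the current prefix, collecting their suffixes
def pvB_runs (level : Int) : List String → List (String × List String)
  | [] => []
  | w :: t =>
    (pvKeyPfx level w,
     pvSufFut level w :: (t.takeWhile (fun x => pvKeyPfx level x == pvKeyPfx level w)).map (pvSufFut level)) ::
      pvB_runs level (t.dropWhile (fun x => pvKeyPfx level x == pvKeyPfx level w))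
  termination_by l => l.length
  decreasing_by
    simp only [List.length_cons]
    exact Nat.lt_succ_of_le (List.length_dropWhile_le _ _)

-- B: "state = groups.get(key); if state is None: ..."
def pvB_groupStep (level : Int)
    (st : PySem.Dict (List String) String × PySem.Dict String String)
    (run : String × List String) :
    PySem.Dict (List String) String × PySem.Dict String String :=
  match st.1.get? run.2 with
  | some s => (st.1, st.2.insert run.1 s)
  | none =>
      let s := pvStateName level st.1.size
      (st.1.insert run.2 s, st.2.insert run.1 s)

def pvB_levelFold (words : List String) (level : Int) :
    PySem.Dict (List String) String × PySem.Dict String String :=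
  (pvB_runs level words).foldl (pvB_groupStep level) (PySem.Dict.empty, PySem.Dict.empty)

def pvB_stateStep (words : List String)
    (acc : List (List String) × List (PySem.Dict String String)) (level : Int) :
    List (List String) × List (PySem.Dict String String) :=
  let gp := pvB_levelFold words level
  (acc.1 ++ [PySem.List.sorted gp.1.values (fun s => s) false], acc.2 ++ [gp.2])

-- B: edges from the keys of the (level+1) prefix map (a set comprehension over a dict,
-- iterated in insertion order; consumed only as a set)
def pvB_edgeStep (maps : List (PySem.Dict String String))
    (acc : List (List (String × String × String))) (level : Int) :
    List (List (String × String × String)) :=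
  let source_map := PySem.List.pyGetD maps level PySem.Dict.empty
  let target_map := PySem.List.pyGetD maps (level + 1) PySem.Dict.empty
  let es := PySem.Set.ofList (target_map.keys.map (fun p =>
      (source_map.getD (PySem.Str.slice p none (some (-1))) "",
       target_map.getD p "",
       ((PySem.Str.pyGet? p (-1)).map (fun c => String.ofList [c])).getD "")))
  acc ++ [pvSortEdges es]

def build_trellis_by_codewords_alt (codewords : List String) :
    List (List String) × (List (List (String × String × String))) :=
  let n : Int := PySem.Str.len ((PySem.List.pyGet? codewords 0).getD "")
  let words := PySem.List.sorted codewords (fun s => s) false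
  let sp := (PySem.List.pyRange 0 (n + 1)).foldl (pvB_stateStep words) ([], [])
  let edges := (PySem.List.pyRange 0 n).foldl (pvB_edgeStep sp.2) []
  (sp.1, edges)

-- ===== PRECONDITION & SPEC =====
-- Pre_ excludes exactly the inputs where Python A raises: the empty list (codewords[0] is
-- an IndexError) and lists containing a word shorter than the first word (word[level] is
-- an IndexError in the edge loop).
def Pre_build_trellis_by_codewords (codewords : List String) : Prop :=
  codewords ≠ [] ∧ ∀ w ∈ codewords, PySem.Str.len (codewords.headD "") ≤ PySem.Str.len w
instance (codewords : List String) : Decidable (Pre_build_trellis_by_codewords codewords) := by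
  unfold Pre_build_trellis_by_codewords; infer_instance

def pvWitness_build_trellis_by_codewords : List String := ["01", "10", "11"]

def Spec_build_trellis_by_codewords (codewords : List String)
    (out : List (List String) × (List (List (String × String × String)))) : Prop :=
  out = build_trellis_by_codewords_alt codewords
instance (codewords : List String) (out : List (List String) × (List (List (String × String × String)))) :
    Decidable (Spec_build_trellis_by_codewords codewords out) := by
  unfold Spec_build_trellis_by_codewords; infer_instance

-- ===== CLAIM (what is proved, stated in full; the proofs are below) =====
def Claim_equal_build_trellis_by_codewords : Prop :=
  ∀ (codewords : List String), Dom_build_trellis_by_codewords codewords →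
    Pre_build_trellis_by_codewords codewords →
    Spec_build_trellis_by_codewords codewords (build_trellis_by_codewords codewords)

-- ===== LEMMAS AND PROOFS =====

-- ---- lexicographic order on List Char: small general facts ----
theorem pv_le_iff (u v : List Char) : u ≤ v ↔ List.Lex (· < ·) u v ∨ u = v := by
  rw [le_iff_lt_or_eq]
  exact or_congr_left ⟨fun h => h, fun h => h⟩

theorem pv_take_lex : ∀ {u v : List Char}, List.Lex (· < ·) u v →
    ∀ (m : Nat), u.take m = v.take m ∨ List.Lex (· < ·) (u.take m) (v.take m) := by
  intro u v h
  induction h with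
  | nil =>
    intro m
    cases m with
    | zero => left; rfl
    | succ m =>
      right
      rw [List.take_nil, List.take_succ_cons]
      exact List.Lex.nil
  | @rel a l₁ b l₂ hab =>
    intro m
    cases m with
    | zero => left; rfl
    | succ m =>
      right
      rw [List.take_succ_cons, List.take_succ_cons]
      exact List.Lex.rel hab
  | @cons a l₁ l₂ h ih =>
    intro m
    cases m with
    | zero => left; rfl
    | succ m =>
      rcases ih m with he | hl
      · left; simp [he]
      · right
        rw [List.take_succ_cons, List.take_succ_cons]
        exact List.Lex.cons hl

theorem pv_take_le_take (m : Nat) {u v : List Char} (h : u ≤ v) : u.take m ≤ v.take m := by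
  rcases (pv_le_iff u v).mp h with hl | heq
  · rcases pv_take_lex hl m with he | hx
    · exact le_of_eq he
    · exact (pv_le_iff _ _).mpr (Or.inl hx)
  · rw [heq]

theorem pv_lex_cons_iff (a : Char) (u v : List Char) :
    List.Lex (· < ·) (a :: u) (a :: v) ↔ List.Lex (· < ·) u v := by
  constructor
  · intro h
    cases h with
    | rel hab => exact absurd hab (lt_irrefl a)
    | cons h => exact h
  · exact List.Lex.cons

theorem pv_append_lex (p : List Char) : ∀ {s s' : List Char},
    List.Lex (· < ·) (p ++ s) (p ++ s') ↔ List.Lex (· < ·) s s' := by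
  induction p with
  | nil => intro s s'; simp
  | cons a t ih =>
    intro s s'
    rw [List.cons_append, List.cons_append, pv_lex_cons_iff]
    exact ih

theorem pv_append_le_append (p : List Char) {s s' : List Char} :
    (p ++ s ≤ p ++ s') ↔ s ≤ s' := by
  rw [pv_le_iff, pv_le_iff, pv_append_lex]
  exact or_congr_right (by simp)

-- ---- prefix/suffix slicing under a nonnegative level ----
theorem pv_key_toList (L : Int) (hL : 0 ≤ L) (w : String) :
    (pvKeyPfx L w).toList = w.toList.take L.toNat := by
  simp [pvKeyPfx, PySem.List.slice_to _ hL]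

theorem pv_suf_toList (L : Int) (hL : 0 ≤ L) (w : String) :
    (pvSufFut L w).toList = w.toList.drop L.toNat := by
  simp [pvSufFut, PySem.List.slice_from _ hL]

theorem pv_key_mono (L : Int) (hL : 0 ≤ L) {w w' : String} (h : w ≤ w') :
    pvKeyPfx L w ≤ pvKeyPfx L w' := by
  rw [String.le_iff_toList_le, pv_key_toList L hL, pv_key_toList L hL]
  exact pv_take_le_take _ (String.le_iff_toList_le.mp h)

theorem pv_suf_mono (L : Int) (hL : 0 ≤ L) {w w' : String}
    (hk : pvKeyPfx L w = pvKeyPfx L w') (h : w ≤ w') :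
    pvSufFut L w ≤ pvSufFut L w' := by
  rw [String.le_iff_toList_le, pv_suf_toList L hL, pv_suf_toList L hL]
  have hkl : w.toList.take L.toNat = w'.toList.take L.toNat := by
    rw [← pv_key_toList L hL, ← pv_key_toList L hL, hk]
  have h1 : w.toList.take L.toNat ++ w.toList.drop L.toNat ≤
      w.toList.take L.toNat ++ w'.toList.drop L.toNat := by
    rw [List.take_append_drop]
    conv_rhs => rw [hkl, List.take_append_drop]
    exact String.le_iff_toList_le.mp h
  exact (pv_append_le_append _).mp h1

-- ---- PySem.Set.ofList facts needed for the run decomposition ----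
theorem pv_discard_not_mem {α : Type} [BEq α] [LawfulBEq α] (s : List α) (k : α) (h : k ∉ s) :
    PySem.Set.discard s k = s := by
  simp only [PySem.Set.discard, List.filter_eq_self]
  intro a ha
  have hak : a ≠ k := fun hc => h (hc ▸ ha)
  simp [hak]

theorem pv_pairwise_ofList {α : Type} [BEq α] [LawfulBEq α] {R : α → α → Prop} :
    ∀ {l : List α}, l.Pairwise R → (PySem.Set.ofList l).Pairwise R := by
  intro l
  induction l with
  | nil => intro _; simp [PySem.Set.ofList_nil]
  | cons x xs ih =>
    intro h
    rcases List.pairwise_cons.mp h with ⟨hx, ht⟩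
    rw [PySem.Set.ofList_cons]
    refine List.pairwise_cons.mpr ⟨?_, ?_⟩
    · intro y hy
      have hy' : y ∈ PySem.Set.ofList xs := by
        simpa only [PySem.Set.discard] using (List.mem_filter.mp hy).1
      exact hx y ((PySem.Set.mem_ofList _ _).mp hy')
    · simpa only [PySem.Set.discard] using List.Pairwise.filter _ (ih ht)

theorem pv_ofList_head {α : Type} [BEq α] [LawfulBEq α] (k : α) :
    ∀ (l₁ l₂ : List α), (∀ x ∈ l₁, x = k) → k ∉ l₂ →
      PySem.Set.ofList (k :: (l₁ ++ l₂)) = k :: PySem.Set.ofList l₂ := by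
  intro l₁
  induction l₁ with
  | nil =>
    intro l₂ _ h2
    rw [List.nil_append, PySem.Set.ofList_cons,
      pv_discard_not_mem _ _ (by simpa [PySem.Set.mem_ofList] using h2)]
  | cons a t ih =>
    intro l₂ h1 h2
    have ha : a = k := h1 a (by simp)
    subst ha
    have hih := ih l₂ (fun x hx => h1 x (by simp [hx])) h2
    rw [List.cons_append, PySem.Set.ofList_cons, hih]
    have hnm : a ∉ PySem.Set.ofList l₂ := fun hc => h2 ((PySem.Set.mem_ofList _ _).mp hc)
    have hd1 : PySem.Set.discard (a :: PySem.Set.ofList l₂) a =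
        PySem.Set.discard (PySem.Set.ofList l₂) a := by
      simp [PySem.Set.discard]
    rw [hd1, pv_discard_not_mem _ _ hnm]

-- ---- B's contiguous sweep over a sorted list = one run per distinct prefix ----
theorem pv_dropWhile_head_false {α : Type} (p : α → Bool) :
    ∀ (l : List α) {h : α} {r : List α}, l.dropWhile p = h :: r → p h = false := by
  intro l
  induction l with
  | nil => intro h r hc; simp at hc
  | cons a t ih =>
    intro h r hc
    by_cases hp : p a
    · rw [List.dropWhile_cons_of_pos hp] at hc
      exact ih hc
    · rw [List.dropWhile_cons_of_neg hp] at hc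
      cases hc
      simpa using hp

theorem pv_runs_eq (L : Int) (hL : 0 ≤ L) :
    ∀ (N : Nat) (ws : List String), ws.length ≤ N → ws.Pairwise (· ≤ ·) →
      pvB_runs L ws = (PySem.Set.ofList (ws.map (pvKeyPfx L))).map
        (fun p => (p, (ws.filter (fun w => pvKeyPfx L w == p)).map (pvSufFut L))) := by
  intro N
  induction N with
  | zero =>
    intro ws hlen _
    have hws : ws = [] := List.length_eq_zero_iff.mp (Nat.le_zero.mp hlen)
    subst hws
    simp [pvB_runs]
  | succ N ih =>
    intro ws hlen hs
    cases ws with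
    | nil => simp [pvB_runs]
    | cons w t =>
      rcases List.pairwise_cons.mp hs with ⟨hwt, hts⟩
      set k := pvKeyPfx L w with hk
      set q : String → Bool := fun x => pvKeyPfx L x == k with hq
      set t₁ := t.takeWhile q with ht₁
      set t₂ := t.dropWhile q with ht₂
      have hsplit : t₁ ++ t₂ = t := by rw [ht₁, ht₂]; exact List.takeWhile_append_dropWhile
      have ht₂p : t₂.Pairwise (· ≤ ·) := by
        rw [ht₂]; exact List.Pairwise.sublist (List.dropWhile_sublist q) hts
      have h1 : ∀ x ∈ t₁, pvKeyPfx L x = k := by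
        intro x hx
        rw [ht₁] at hx
        have hqx := List.mem_takeWhile_imp hx
        rw [hq] at hqx
        exact beq_iff_eq.mp hqx
      have h2 : ∀ x ∈ t₂, pvKeyPfx L x ≠ k := by
        intro x hx
        cases hx2 : t₂ with
        | nil => rw [hx2] at hx; simp at hx
        | cons h r =>
          have hd : t.dropWhile q = h :: r := by rw [← ht₂]; exact hx2
          have hhead : q h = false := pv_dropWhile_head_false q t hd
          have hhk : pvKeyPfx L h ≠ k := by
            intro hc
            rw [hq] at hhead
            simp only [hc, beq_self_eq_true] at hhead
            exact absurd hhead (by simp)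
          have hwh : w ≤ h := hwt h (List.Sublist.mem (by rw [hd]; simp)
            (List.dropWhile_sublist q))
          rw [hx2] at hx
          rcases List.mem_cons.mp hx with rfl | hxr
          · exact hhk
          · intro hc
            have hhx : h ≤ x := (List.pairwise_cons.mp (hx2 ▸ ht₂p)).1 x hxr
            have h3 : pvKeyPfx L h ≤ pvKeyPfx L x := pv_key_mono L hL hhx
            have h4 : k ≤ pvKeyPfx L h := pv_key_mono L hL hwh
            exact hhk (le_antisymm (hc ▸ h3) h4)
      have hkeys : PySem.Set.ofList ((w :: t).map (pvKeyPfx L)) =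
          k :: PySem.Set.ofList (t₂.map (pvKeyPfx L)) := by
        have hmaps : (w :: t).map (pvKeyPfx L) = k :: (t₁.map (pvKeyPfx L) ++ t₂.map (pvKeyPfx L)) := by
          rw [← hsplit]
          simp [← hk]
        rw [hmaps]
        exact pv_ofList_head k _ _
          (by intro x hx; rcases List.mem_map.mp hx with ⟨y, hy, rfl⟩; exact h1 y hy)
          (by intro hc; rcases List.mem_map.mp hc with ⟨y, hy, hyk⟩; exact h2 y hy hyk)
      have hfk : (w :: t).filter (fun x => pvKeyPfx L x == k) = w :: t₁ := by
        rw [List.filter_cons_of_pos (by rw [← hk]; exact beq_self_eq_true k), ← hsplit,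
          List.filter_append,
          List.filter_eq_self.mpr (by intro a ha; simpa using h1 a ha),
          List.filter_eq_nil_iff.mpr (by intro a ha; simpa using h2 a ha), List.append_nil]
      have hrest : ∀ p ∈ PySem.Set.ofList (t₂.map (pvKeyPfx L)),
          (w :: t).filter (fun x => pvKeyPfx L x == p) = t₂.filter (fun x => pvKeyPfx L x == p) := by
        intro p hp
        rcases List.mem_map.mp ((PySem.Set.mem_ofList _ _).mp hp) with ⟨y, hy, rfl⟩
        have hpk : pvKeyPfx L y ≠ k := h2 y hy
        rw [List.filter_cons_of_neg (by simpa [← hk] using fun hc => hpk hc.symm), ← hsplit,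
          List.filter_append,
          List.filter_eq_nil_iff.mpr (by
            intro a ha
            simp only [beq_iff_eq]
            intro hc
            exact hpk ((h1 a ha ▸ hc : k = pvKeyPfx L y).symm)), List.nil_append]
      have ht₂len : t₂.length ≤ N := by
        have hdl := List.length_dropWhile_le q t
        rw [← ht₂] at hdl
        simp only [List.length_cons] at hlen
        omega
      rw [pvB_runs, ← hk, ← hq, ← ht₁, ← ht₂, ih t₂ ht₂len ht₂p, hkeys, List.map_cons, hfk]
      refine congrArg₂ List.cons ?_ ?_
      · rw [List.map_cons]
      · exact (List.map_congr_left (fun p hp => by rw [hrest p hp])).symm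

-- ---- A's per-prefix futures = B's run suffixes, on the sorted list ----
theorem pv_fut_eq (L : Int) (hL : 0 ≤ L) (codewords : List String) (p : String) :
    PySem.List.sorted
        ((codewords.filter (fun word => PySem.Str.slice word none (some L) == p)).map
          (fun word => PySem.Str.slice word (some L) none)) (fun s => s) false =
      ((PySem.List.sorted codewords (fun s => s) false).filter
          (fun w => pvKeyPfx L w == p)).map (pvSufFut L) := by
  apply PySem.List.sorted_id_eq_of_perm_of_pairwise
  · exact ((PySem.List.sorted_perm codewords (fun s => s) false).filter _).map _
  · have hws : (PySem.List.sorted codewords (fun s => s) false).Pairwise (· ≤ ·) := by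
      exact PySem.List.sorted_pairwise codewords (fun s => s)
    have hf : ((PySem.List.sorted codewords (fun s => s) false).filter
        (fun w => pvKeyPfx L w == p)).Pairwise
        (fun a b => pvSufFut L a ≤ pvSufFut L b) := by
      refine List.Pairwise.imp_of_mem ?_ (List.Pairwise.filter _ hws)
      intro a b ha hb hab
      have hka : pvKeyPfx L a = p := by simpa using (List.mem_filter.mp ha).2
      have hkb : pvKeyPfx L b = p := by simpa using (List.mem_filter.mp hb).2
      exact pv_suf_mono L hL (hka.trans hkb.symm) hab
    exact List.pairwise_map.mpr hf

-- ---- the distinct sorted prefixes = the distinct keys of the sorted word list ----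
theorem pv_prefixes_eq (L : Int) (hL : 0 ≤ L) (codewords : List String) :
    pvA_prefixes codewords L =
      PySem.Set.ofList ((PySem.List.sorted codewords (fun s => s) false).map (pvKeyPfx L)) := by
  unfold pvA_prefixes
  apply PySem.List.sorted_id_eq_of_perm_of_pairwise
  · apply (List.perm_ext_iff_of_nodup (PySem.Set.nodup_ofList _) (PySem.Set.nodup_ofList _)).mpr
    intro p
    simp only [PySem.Set.mem_ofList, List.mem_map, PySem.List.mem_sorted, pvKeyPfx]
  · apply pv_pairwise_ofList
    apply List.pairwise_map.mpr
    refine List.Pairwise.imp_of_mem ?_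
      (PySem.List.sorted_pairwise codewords (fun s => s))
    intro a b _ _ hab
    exact pv_key_mono L hL hab

-- ---- B's group step with A's futures literally = A's group step ----
theorem pv_groupStep_eq (L : Int) (codewords : List String)
    (st : PySem.Dict (List String) String × PySem.Dict String String) (p : String) :
    pvB_groupStep L st (p,
        PySem.List.sorted
          ((codewords.filter (fun word => PySem.Str.slice word none (some L) == p)).map
            (fun word => PySem.Str.slice word (some L) none)) (fun s => s) false) =
      pvA_groupStep L codewords st p := by
  unfold pvB_groupStep pvA_groupStep
  set futs := PySem.List.sorted
      ((codewords.filter (fun word => PySem.Str.slice word none (some L) == p)).map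
        (fun word => PySem.Str.slice word (some L) none)) (fun s => s) false with hf
  cases hg : st.1.get? futs with
  | some s =>
    have hc : st.1.contains futs = true := by
      rw [PySem.Dict.contains_eq_isSome_get?, hg]; rfl
    simp only [hc, if_true]
    rw [PySem.Dict.getD_of_get?_eq_some _ _ hg]
  | none =>
    have hc : st.1.contains futs = false := by
      rw [PySem.Dict.contains_eq_isSome_get?, hg]; rfl
    simp only [hc, Bool.false_eq_true, if_false]
    rw [PySem.Dict.getD_insert_self]

theorem pv_levelFold_eq (codewords : List String) (L : Int) (hL : 0 ≤ L) :
    pvB_levelFold (PySem.List.sorted codewords (fun s => s) false) L =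
      pvA_levelFold codewords L := by
  unfold pvB_levelFold pvA_levelFold
  rw [pv_runs_eq L hL (PySem.List.sorted codewords (fun s => s) false).length _ le_rfl
      (PySem.List.sorted_pairwise codewords (fun s => s)),
    ← pv_prefixes_eq L hL, List.foldl_map]
  apply PySem.List.foldl_congr_mem
  intro st p _
  rw [← pv_fut_eq L hL codewords p]
  exact pv_groupStep_eq L codewords st p

theorem pv_stateStep_eq (codewords : List String) (L : Int) (hL : 0 ≤ L)
    (acc : List (List String) × List (PySem.Dict String String)) :
    pvB_stateStep (PySem.List.sorted codewords (fun s => s) false) acc L =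
      pvA_stateStep codewords acc L := by
  unfold pvB_stateStep pvA_stateStep
  rw [pv_levelFold_eq codewords L hL]

-- ---- the state fold, spelled out (for locating the prefix maps) ----
theorem pv_stateFold (codewords : List String) (m : Int)
    (acc1 : List (List String)) (acc2 : List (PySem.Dict String String)) :
    (PySem.List.pyRange 0 m).foldl (pvA_stateStep codewords) (acc1, acc2) =
      (acc1 ++ (PySem.List.pyRange 0 m).map (fun l => PySem.List.sorted (pvA_levelFold codewords l).1.values (fun s => s) false),
       acc2 ++ (PySem.List.pyRange 0 m).map (fun l => (pvA_levelFold codewords l).2)) := by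
  have h : pvA_stateStep codewords = fun (acc : List (List String) × List (PySem.Dict String String)) (level : Int) =>
      ((fun (a : List (List String)) (l : Int) => a ++ [PySem.List.sorted (pvA_levelFold codewords l).1.values (fun s => s) false]) acc.1 level,
       (fun (a : List (PySem.Dict String String)) (l : Int) => a ++ [(pvA_levelFold codewords l).2]) acc.2 level) := rfl
  rw [h, PySem.List.foldl_prod_mk
      (f := fun (a : List (List String)) (l : Int) => a ++ [PySem.List.sorted (pvA_levelFold codewords l).1.values (fun s => s) false])
      (g := fun (a : List (PySem.Dict String String)) (l : Int) => a ++ [(pvA_levelFold codewords l).2]),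
    PySem.List.foldl_append_singleton_eq_map, PySem.List.foldl_append_singleton_eq_map]

theorem pv_keys_insert {κ ν : Type} [BEq κ] [LawfulBEq κ] (d : PySem.Dict κ ν) (k : κ) (v : ν) :
    (d.insert k v).keys = PySem.Set.add d.keys k := by
  have := PySem.Dict.keys_foldl_insert_key (ν := ν) [k] id (fun _ _ => v) d
  simpa [PySem.Set.update] using this

theorem pv_keys_snd_fold (level : Int) (codewords : List String) (l : List String)
    (st : PySem.Dict (List String) String × PySem.Dict String String) :
    ((l.foldl (pvA_groupStep level codewords) st).2).keys = PySem.Set.update st.2.keys l := by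
  induction l generalizing st with
  | nil => rfl
  | cons p t ih =>
    rw [List.foldl_cons, ih]
    have hk : ((pvA_groupStep level codewords st p).2).keys = PySem.Set.add st.2.keys p := by
      unfold pvA_groupStep
      exact pv_keys_insert _ _ _
    rw [hk]
    rfl

theorem pv_prefixes_nodup (codewords : List String) (level : Int) :
    (pvA_prefixes codewords level).Nodup := by
  unfold pvA_prefixes
  exact ((PySem.List.sorted_perm _ _ _).nodup_iff).mpr (PySem.Set.nodup_ofList _)

theorem pv_pmap_keys (codewords : List String) (level : Int) :
    ((pvA_levelFold codewords level).2).keys = pvA_prefixes codewords level := by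
  unfold pvA_levelFold
  rw [pv_keys_snd_fold]
  have h : PySem.Set.update ((PySem.Dict.empty : PySem.Dict String String).keys) (pvA_prefixes codewords level)
      = PySem.Set.ofList (pvA_prefixes codewords level) := by
    rw [PySem.Dict.keys_empty, PySem.Set.ofList_eq_foldl]; rfl
  rw [h, PySem.Set.ofList_eq_self_of_nodup _ (pv_prefixes_nodup _ _)]

theorem pv_mem_prefixes (codewords : List String) (level : Int) (p : String) :
    p ∈ pvA_prefixes codewords level ↔ ∃ w ∈ codewords, PySem.Str.slice w none (some level) = p := by
  unfold pvA_prefixes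
  rw [PySem.List.mem_sorted, PySem.Set.mem_ofList, List.mem_map]

-- slicing facts for a word with at least k+1 characters
theorem pv_pyGet_neg_one {α : Type} (xs : List α) (k : Nat) (h : xs.length = k + 1) :
    PySem.List.pyGet? xs (-1) = xs[k]? := by
  simp [PySem.List.pyGet?, PySem.List.pyIdx?, h]

theorem pv_slice_dropLast (w : String) (k : Nat) (hw : k + 1 ≤ w.toList.length) :
    PySem.Str.slice (PySem.Str.slice w none (some ((k : Int) + 1))) none (some (-1)) =
      PySem.Str.slice w none (some (k : Int)) := by
  apply String.toList_inj.mp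
  rw [PySem.Str.slice_to_neg_one]
  simp only [PySem.Str.toList_slice, PySem.Chars.slice_eq_listSlice]
  rw [PySem.List.slice_to _ (by positivity), PySem.List.slice_to _ (by positivity)]
  rw [List.dropLast_eq_take, List.take_take]
  congr 1
  simp only [List.length_take]
  omega

theorem pv_slice_last (w : String) (k : Nat) (hw : k + 1 ≤ w.toList.length) :
    PySem.Str.pyGet? (PySem.Str.slice w none (some ((k : Int) + 1))) (-1) = PySem.Str.pyGet? w (k : Int) := by
  rw [PySem.Str.pyGet?_eq, PySem.Str.pyGet?_eq]
  simp only [PySem.Chars.pyGet?_eq_listPyGet?, PySem.Str.toList_slice, PySem.Chars.slice_eq_listSlice]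
  rw [PySem.List.slice_to _ (by positivity)]
  have hk1 : ((k:Int)+1).toNat = k + 1 := by omega
  have hl : (List.take ((k:Int)+1).toNat w.toList).length = k + 1 := by
    simp only [List.length_take]; omega
  rw [pv_pyGet_neg_one _ k hl, List.getElem?_take, PySem.List.pyGet?_natCast]
  simp [hk1]

theorem pv_edge_eq (maps : List (PySem.Dict String String)) (k : Nat) (w : String)
    (hw : k + 1 ≤ w.toList.length) :
    (((PySem.List.pyGetD maps (k : Int) PySem.Dict.empty).getD
        (PySem.Str.slice (PySem.Str.slice w none (some ((k : Int) + 1))) none (some (-1))) ""),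
      ((PySem.List.pyGetD maps ((k : Int) + 1) PySem.Dict.empty).getD (PySem.Str.slice w none (some ((k : Int) + 1))) ""),
      ((PySem.Str.pyGet? (PySem.Str.slice w none (some ((k : Int) + 1))) (-1)).map (fun c => String.ofList [c])).getD "") =
      pvA_edge maps (k : Int) w := by
  rw [pv_slice_dropLast w k hw, pv_slice_last w k hw]
  rfl

def pvMaps (codewords : List String) (N : Nat) : List (PySem.Dict String String) :=
  (PySem.List.pyRange 0 ((N : Int) + 1)).map (fun l => (pvA_levelFold codewords l).2)

theorem pv_maps_get (codewords : List String) (N j : Nat) (hj : j ≤ N) :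
    PySem.List.pyGetD (pvMaps codewords N) (j : Int) PySem.Dict.empty
      = (pvA_levelFold codewords (j : Int)).2 := by
  unfold pvMaps
  have hc : ((N : Int) + 1) = ((N + 1 : Nat) : Int) := by push_cast; ring
  rw [hc, PySem.List.pyGetD_map_pyRange _ (N + 1) j _ (by omega)]

theorem pv_edgeKey_inj : Function.Injective pvEdgeKey := by
  intro a b hab
  obtain ⟨a1, a2, a3⟩ := a
  obtain ⟨b1, b2, b3⟩ := b
  simp only [pvEdgeKey, List.cons.injEq, and_true] at hab
  obtain ⟨h1, h2, h3⟩ := hab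
  simp [h1, h2, h3]

theorem pv_edgeStep_eq (codewords : List String) (N k : Nat) (hk : k < N)
    (hlen : ∀ w ∈ codewords, N ≤ w.toList.length)
    (acc : List (List (String × String × String))) :
    pvA_edgeStep codewords (pvMaps codewords N) acc (k : Int) =
      pvB_edgeStep (pvMaps codewords N) acc (k : Int) := by
  unfold pvA_edgeStep pvB_edgeStep
  simp only []
  congr 2
  have hc : ((k : Int) + 1) = ((k + 1 : Nat) : Int) := by push_cast; ring
  have htgt : PySem.List.pyGetD (pvMaps codewords N) ((k : Int) + 1) PySem.Dict.empty
      = (pvA_levelFold codewords ((k + 1 : Nat) : Int)).2 := by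
    rw [hc, pv_maps_get _ _ _ (by omega)]
  have hA : codewords.foldl (fun s word => PySem.Set.add s (pvA_edge (pvMaps codewords N) (k : Int) word)) PySem.Set.empty
      = PySem.Set.ofList (codewords.map (pvA_edge (pvMaps codewords N) (k : Int))) := by
    rw [PySem.Set.ofList_eq_foldl, List.foldl_map]
    rfl
  rw [hA]
  apply PySem.List.sorted_eq_sorted_of_perm _ _ _ pv_edgeKey_inj
  apply (List.perm_ext_iff_of_nodup (PySem.Set.nodup_ofList _) (PySem.Set.nodup_ofList _)).mpr
  intro e
  rw [PySem.Set.mem_ofList, PySem.Set.mem_ofList, List.mem_map, List.mem_map]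
  constructor
  · rintro ⟨w, hw, rfl⟩
    refine ⟨PySem.Str.slice w none (some ((k : Int) + 1)), ?_, ?_⟩
    · rw [htgt, pv_pmap_keys, pv_mem_prefixes]
      exact ⟨w, hw, by rw [hc]⟩
    · exact pv_edge_eq (pvMaps codewords N) k w (by have := hlen w hw; omega)
  · rintro ⟨p, hp, rfl⟩
    rw [htgt, pv_pmap_keys, pv_mem_prefixes] at hp
    obtain ⟨w, hw, hpw⟩ := hp
    refine ⟨w, hw, ?_⟩
    rw [← hpw, ← hc]
    exact (pv_edge_eq (pvMaps codewords N) k w (by have := hlen w hw; omega)).symm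

-- ===== VERDICT (by name: the statement is the Claim_ definition above) =====
theorem build_trellis_by_codewords_spec : Claim_equal_build_trellis_by_codewords := by
  intro codewords hdom hpre
  obtain ⟨hne, hlen⟩ := hpre
  unfold Spec_build_trellis_by_codewords build_trellis_by_codewords build_trellis_by_codewords_alt
  simp only []
  set n : Int := PySem.Str.len ((PySem.List.pyGet? codewords 0).getD "") with hn
  have hn0 : 0 ≤ n := by rw [hn, PySem.Str.len_eq]; positivity
  have hBA : (PySem.List.pyRange 0 (n + 1)).foldl
      (pvB_stateStep (PySem.List.sorted codewords (fun s => s) false)) ([], []) =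
      (PySem.List.pyRange 0 (n + 1)).foldl (pvA_stateStep codewords) ([], []) := by
    apply PySem.List.foldl_congr_mem
    intro acc x hx
    rw [PySem.List.mem_pyRange_one] at hx
    exact pv_stateStep_eq codewords x hx.1 acc
  rw [hBA]
  set N : Nat := n.toNat with hN
  have hnN : n = (N : Int) := by omega
  have hsp : ((PySem.List.pyRange 0 (n + 1)).foldl (pvA_stateStep codewords) ([], [])).2
      = pvMaps codewords N := by
    rw [pv_stateFold]
    rw [hnN]
    simp [pvMaps]
  have hhead : ∀ w ∈ codewords, N ≤ w.toList.length := by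
    intro w hw
    have h1 := hlen w hw
    have h2 : codewords.headD "" = (PySem.List.pyGet? codewords 0).getD "" := by
      cases codewords with
      | nil => exact absurd rfl hne
      | cons c t => simp [PySem.List.pyGet?, PySem.List.pyIdx?]
    rw [h2, ← hn] at h1
    rw [PySem.Str.len_eq] at h1
    omega
  rw [hsp]
  congr 1
  apply PySem.List.foldl_congr_mem
  intro acc x hx
  rw [PySem.List.mem_pyRange_one] at hx
  have hx' : x = ((x.toNat : Nat) : Int) := by omega
  rw [hx']
  exact pv_edgeStep_eq codewords N x.toNat (by omega) hhead acc
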